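-- pv_equiv track=rewrite | github.com/Fuzyal234/Fuz_AgenticAI | tools/ci_tool.py | extract_errors_from_logs
-- ===== SOURCE A (Python) =====
-- from typing import Dict, List, Optional, Any
--
-- def extract_errors_from_logs(logs: str) -> List[Dict[str, str]]:
--     """Extract error patterns from CI logs."""
--     errors = []
--     lines = logs.split("\n")
--
--     current_error = None
--     for line in lines:
--         if any(keyword in line.lower() for keyword in ["error:", "failed:", "exception:"]):
--             if current_error:
--                 errors.append(current_error)
--             current_error = {"type": "error", "message": line}
--         elif current_error and line.strip():
--             current_error["message"] += "\n" + line
--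
--     if current_error:
--         errors.append(current_error)
--
--     return errors
-- ===== SOURCE B (Python) =====
-- from typing import Dict, List, Optional, Any
--
-- def extract_errors_from_logs(logs: str) -> List[Dict[str, str]]:
--     """Extract error patterns from CI logs (block-at-a-time grouping)."""
--     def is_header(line):
--         low = line.lower()
--         return "error:" in low or "failed:" in low or "exception:" in low
--
--     lines = logs.split("\n")
--     n = len(lines)
--     blocks = []
--     i = 0
--     while i < n:
--         if not is_header(lines[i]):
--             i += 1
--             continue
--         header = lines[i]
--         i += 1
--         body = []
--         while i < n and not is_header(lines[i]):
--             if lines[i].strip():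
--                 body.append(lines[i])
--             i += 1
--         blocks.append({"type": "error", "message": "\n".join([header] + body)})
--     return blocks
-- ===== Notes on version B (the rewrite author's own statement) =====
-- stated objective: alternative
-- what changed: B replaces A's one-pass state machine (an optional current-error dict whose message grows by string +=) with nested loops: an outer scan that finds each header line and an inner scan that collects the following non-blank lines of the block, building each message with one join.
import Mathlib
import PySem

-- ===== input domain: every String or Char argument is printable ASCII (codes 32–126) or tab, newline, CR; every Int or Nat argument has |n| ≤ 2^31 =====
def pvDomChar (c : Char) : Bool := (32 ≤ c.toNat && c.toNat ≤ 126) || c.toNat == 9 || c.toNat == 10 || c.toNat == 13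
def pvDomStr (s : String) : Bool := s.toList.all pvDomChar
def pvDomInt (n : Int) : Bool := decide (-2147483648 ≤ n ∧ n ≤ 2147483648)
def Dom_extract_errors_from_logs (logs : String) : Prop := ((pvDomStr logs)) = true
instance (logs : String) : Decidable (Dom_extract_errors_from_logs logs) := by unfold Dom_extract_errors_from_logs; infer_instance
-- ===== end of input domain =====

-- B groups the split lines block by block (outer scan finds a header, inner scan collects
-- the block's non-blank body lines, one join per block) instead of A's one-pass state
-- machine with a mutable current-error dict; same cost, different decomposition.

-- ===== PORT A =====
-- The dict {"type": ..., "message": ...} is ported as its association list; the in-place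
-- update current_error["message"] += "\n" + line is ported as an update of the (unique)
-- "message" key of that list — exact, since dict keys are unique and order is kept.
def pvALoop : List String → List (List (String × String)) → Option (List (String × String)) → List (List (String × String))
  | [], errors, current =>
      match current with
      | some d => errors ++ [d]
      | none => errors
  | line :: rest, errors, current =>
      if (["error:", "failed:", "exception:"] : List String).any
           (fun keyword => PySem.Str.isIn keyword (PySem.Str.lower line)) then
        pvALoop rest
          (match current with
           | some d => errors ++ [d]
           | none => errors)
          (some [("type", "error"), ("message", line)])
      else if current.isSome && (PySem.Str.strip line != "") then
        pvALoop rest errors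
          (current.map (fun d =>
            d.map (fun p => if p.1 == "message" then (p.1, p.2 ++ "\n" ++ line) else p)))
      else
        pvALoop rest errors current

-- logs.split("\n"): sep = "\n" ≠ "", so split? is always `some` and getD never fires
def extract_errors_from_logs (logs : String) : List (List (String × String)) :=
  pvALoop ((PySem.Str.split? logs "\n").getD []) [] none

-- ===== PORT B =====
def pvIsHeader (line : String) : Bool :=
  let low := PySem.Str.lower line
  PySem.Str.isIn "error:" low || PySem.Str.isIn "failed:" low || PySem.Str.isIn "exception:" low

-- inner while loop of Source B: collect the non-blank lines before the next header,
-- return them together with the remaining suffix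
def pvCollectBody : List String → List String × List String
  | [] => ([], [])
  | line :: rest =>
      if pvIsHeader line then ([], line :: rest)
      else
        let p := pvCollectBody rest
        (if PySem.Str.strip line != "" then line :: p.1 else p.1, p.2)

theorem pvCollectBody_snd_length (ls : List String) : (pvCollectBody ls).2.length ≤ ls.length := by
  induction ls with
  | nil => simp [pvCollectBody]
  | cons line rest ih =>
      simp only [pvCollectBody]
      split
      · simp
      · simpa using Nat.le_succ_of_le ih

-- outer while loop of Source B, as recursion over the remaining suffix of lines
def pvBlocks : List String → List (List (String × String))
  | [] => []
  | line :: rest =>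
      if pvIsHeader line then
        [("type", "error"), ("message", PySem.Str.join "\n" (line :: (pvCollectBody rest).1))]
          :: pvBlocks (pvCollectBody rest).2
      else pvBlocks rest
termination_by ls => ls.length
decreasing_by
  · exact Nat.lt_succ_of_le (pvCollectBody_snd_length rest)
  · exact Nat.lt_succ_self _

def extract_errors_from_logs_alt (logs : String) : List (List (String × String)) :=
  pvBlocks ((PySem.Str.split? logs "\n").getD [])

-- ===== PRECONDITION & SPEC =====
def Spec_extract_errors_from_logs (logs : String) (out : List (List (String × String))) : Prop := out = extract_errors_from_logs_alt logs
instance (logs : String) (out : List (List (String × String))) : Decidable (Spec_extract_errors_from_logs logs out) := by unfold Spec_extract_errors_from_logs; infer_instance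

-- ===== CLAIM (what is proved, stated in full; the proofs are below) =====
def Claim_equal_extract_errors_from_logs : Prop := ∀ (logs : String), Dom_extract_errors_from_logs logs → Spec_extract_errors_from_logs logs (extract_errors_from_logs logs)

-- ===== LEMMAS AND PROOFS =====

-- A's inline `any(...)` test coincides with B's is_header helper
theorem pvAny_eq_isHeader (line : String) :
    (["error:", "failed:", "exception:"] : List String).any
      (fun keyword => PySem.Str.isIn keyword (PySem.Str.lower line)) = pvIsHeader line := by
  simp [pvIsHeader, Bool.or_assoc]

theorem pvJoin_singleton (m : String) : PySem.Str.join "\n" [m] = m := by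
  apply String.toList_inj.mp
  simp [PySem.Str.toList_join, PySem.Chars.join_singleton]

-- absorbing the second element into the head does not change a join
theorem pvJoin_shift (a b : String) (t : List String) :
    PySem.Str.join "\n" (a :: b :: t) = PySem.Str.join "\n" ((a ++ "\n" ++ b) :: t) := by
  apply String.toList_inj.mp
  cases t with
  | nil => simp [PySem.Str.toList_join, PySem.Chars.join_cons_cons, PySem.Chars.join_singleton,
      List.append_assoc]
  | cons c t' => simp [PySem.Str.toList_join, PySem.Chars.join_cons_cons, List.append_assoc]

-- A's loop with an open current error = emit that block (as B builds it), then B's blocks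
theorem pvALoop_some (ls : List String) (errors : List (List (String × String))) (m : String) :
    pvALoop ls errors (some [("type", "error"), ("message", m)]) =
      errors ++ [("type", "error"), ("message", PySem.Str.join "\n" (m :: (pvCollectBody ls).1))]
        :: pvBlocks (pvCollectBody ls).2 := by
  induction ls generalizing errors m with
  | nil =>
      simp only [pvALoop, pvCollectBody, pvBlocks, pvJoin_singleton]
  | cons line rest ih =>
      by_cases hh : pvIsHeader line = true
      · rw [pvALoop, if_pos (by simp only [pvAny_eq_isHeader]; exact hh)]
        rw [ih, pvCollectBody, if_pos hh, pvBlocks, if_pos hh]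
        simp [pvJoin_singleton]
      · rw [pvALoop, if_neg (by simp only [pvAny_eq_isHeader]; exact hh)]
        by_cases hs : (PySem.Str.strip line != "") = true
        · rw [if_pos (by simp [hs])]
          simp only [Option.map_some, List.map_cons, List.map_nil,
            show (("type" : String) == "message") = false from by decide,
            show (("message" : String) == "message") = true from by decide,
            Bool.false_eq_true, if_false, if_true]
          rw [ih, pvCollectBody, if_neg hh]
          simp only [hs, if_true]
          rw [pvJoin_shift]
        · rw [if_neg (by simp_all)]
          rw [ih, pvCollectBody, if_neg hh]
          simp only [Bool.not_eq_true] at hs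
          simp [hs]

-- A's loop with no open error = B's blocks
theorem pvALoop_none (ls : List String) (errors : List (List (String × String))) :
    pvALoop ls errors none = errors ++ pvBlocks ls := by
  induction ls generalizing errors with
  | nil => simp [pvALoop, pvBlocks]
  | cons line rest ih =>
      by_cases hh : pvIsHeader line = true
      · rw [pvALoop, if_pos (by simp only [pvAny_eq_isHeader]; exact hh)]
        rw [pvALoop_some, pvBlocks, if_pos hh]
      · rw [pvALoop, if_neg (by simp only [pvAny_eq_isHeader]; exact hh)]
        simp only [Option.isSome_none, Bool.false_and, Bool.false_eq_true, if_false]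
        rw [ih, pvBlocks, if_neg hh]

-- ===== VERDICT (by name: the statement is the Claim_ definition above) =====
theorem extract_errors_from_logs_spec : Claim_equal_extract_errors_from_logs := by
  intro logs _
  unfold Spec_extract_errors_from_logs extract_errors_from_logs extract_errors_from_logs_alt
  rw [pvALoop_none]
  simp
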